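-- pv_equiv track=rewrite | github.com/MrBrantCode/unitest_baseline | mut_generate/mist_train_taco/taco_12424/solution.py | can_jon_win
-- ===== SOURCE A (Python) =====
-- def can_jon_win(n, piles):
--     memo = {}
--
--     def get_reachable_states(k, max_allowed):
--         states = []
--         for i in range(1, min(k, max_allowed) + 1):
--             new_k = k - i
--             states.append((new_k, i - 1))
--         return states
--
--     def Grundy(k, max_allowed):
--         if k == 0:
--             return 0
--         if (k, max_allowed) in memo:
--             return memo[k, max_allowed]
--         reachable_states = get_reachable_states(k, max_allowed)
--         if len(reachable_states) == 0:
--             memo[k, max_allowed] = 0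
--             return 0
--         s = set()
--         for state in reachable_states:
--             s.add(Grundy(*state))
--         i = 0
--         while i in s:
--             i += 1
--         memo[k, max_allowed] = i
--         return memo[k, max_allowed]
--
--     GrundyTotal = 0
--     for k in piles:
--         GrundyTotal ^= Grundy(k, k)
--
--     return 'YES' if GrundyTotal == 0 else 'NO'
-- ===== SOURCE B (Python) =====
-- def can_jon_win(n, piles):
--     # Grundy(k, k) = largest t with t*(t+1)/2 <= k (0 for k <= 0); answer by XOR.
--     g = 0
--     for k in piles:
--         t = 0
--         while (t + 1) * (t + 2) <= 2 * k:
--             t += 1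
--         g ^= t
--     return 'YES' if g == 0 else 'NO'
-- ===== Notes on version B (the rewrite author's own statement) =====
-- stated objective: faster
-- what changed: B replaces A's memoized recursive Grundy computation (mex over all reachable (k-i,i-1) states) with the closed form Grundy(k,k) = largest t with t(t+1)/2 <= k, found by a single incrementing loop per pile, XORed across piles.
import Mathlib
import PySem

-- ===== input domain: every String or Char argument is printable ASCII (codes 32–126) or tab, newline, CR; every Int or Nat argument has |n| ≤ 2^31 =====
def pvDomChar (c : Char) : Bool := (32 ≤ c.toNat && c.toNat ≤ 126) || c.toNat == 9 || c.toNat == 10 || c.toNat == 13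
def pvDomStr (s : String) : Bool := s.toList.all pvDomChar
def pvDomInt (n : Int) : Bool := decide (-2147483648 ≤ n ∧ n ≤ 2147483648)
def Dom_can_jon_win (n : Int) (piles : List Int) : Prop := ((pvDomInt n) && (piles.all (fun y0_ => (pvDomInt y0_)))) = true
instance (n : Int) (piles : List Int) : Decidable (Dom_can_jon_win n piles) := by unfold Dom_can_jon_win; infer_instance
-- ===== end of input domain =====

-- B replaces A's memoized recursive Grundy/mex computation with the closed form
-- Grundy(k,k) = largest t with t(t+1)/2 ≤ k, found by one incrementing loop per pile (faster).

-- ===== PORT A =====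

-- get_reachable_states(k, max_allowed)
def pvStates (k m : Int) : List (Int × Int) :=
  (PySem.List.pyRange 1 (min k m + 1) 1).map (fun i => (k - i, i - 1))

-- 'i = 0; while i in s: i += 1'  (the Nat fuel only makes the loop structural;
-- len(s)+1 steps always suffice: each step consumes one distinct element of s)
def pvMexLoop (fuel : Nat) (s : List Int) (i : Int) : Int :=
  match fuel with
  | 0 => i
  | .succ f => if i ∈ s then pvMexLoop f s (i + 1) else i

-- Grundy(k, max_allowed), the shared memo threaded through; the Nat fuel only makes
-- the recursion structural (it is always given enough fuel: one unit per unit of k)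
def pvGrundy (fuel : Nat) (k m : Int) (memo : Std.HashMap (Int × Int) Int) :
    Int × Std.HashMap (Int × Int) Int :=
  match fuel with
  | 0 => (0, memo)
  | .succ f =>
    if k = 0 then (0, memo)
    else
      match memo.get? (k, m) with
      | some v => (v, memo)
      | none =>
        if (pvStates k m).length = 0 then (0, memo.insert (k, m) 0)
        else
          -- 's = set(); for state in reachable_states: s.add(Grundy(*state))'
          let r := (pvStates k m).foldl
            (fun (acc : PySem.Set Int × Std.HashMap (Int × Int) Int) st =>
              let g := pvGrundy f st.1 st.2 acc.2
              (PySem.Set.add acc.1 g.1, g.2))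
            (PySem.Set.empty, memo)
          let i := pvMexLoop (r.1.length + 1) r.1 0
          (i, r.2.insert (k, m) i)

def can_jon_win (n : Int) (piles : List Int) : String :=
  let r := piles.foldl
    (fun (acc : Int × Std.HashMap (Int × Int) Int) k =>
      let g := pvGrundy (k.toNat + 1) k k acc.2
      (PySem.Int.bxor acc.1 g.1, g.2))
    (0, (∅ : Std.HashMap (Int × Int) Int))
  if r.1 = 0 then "YES" else "NO"

-- ===== PORT B =====

-- 't = 0; while (t+1)*(t+2) <= 2*k: t += 1'  (fuel k+1 suffices: t never exceeds k)
def pvTLoop (fuel : Nat) (k t : Int) : Int :=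
  match fuel with
  | 0 => t
  | .succ f => if (t + 1) * (t + 2) ≤ 2 * k then pvTLoop f k (t + 1) else t

def can_jon_win_alt (n : Int) (piles : List Int) : String :=
  let g := piles.foldl (fun acc k => PySem.Int.bxor acc (pvTLoop (k.toNat + 1) k 0)) 0
  if g = 0 then "YES" else "NO"

-- ===== PRECONDITION & SPEC =====
def Spec_can_jon_win (n : Int) (piles : List Int) (out : String) : Prop := out = can_jon_win_alt n piles
instance (n : Int) (piles : List Int) (out : String) : Decidable (Spec_can_jon_win n piles out) := by unfold Spec_can_jon_win; infer_instance

-- ===== CLAIM (what is proved, stated in full; the proofs are below) =====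
def Claim_equal_can_jon_win : Prop := ∀ (n : Int) (piles : List Int), Dom_can_jon_win n piles → Spec_can_jon_win n piles (can_jon_win n piles)

-- ===== LEMMAS AND PROOFS =====

-- every reachable state has a smaller first component
theorem pvStates_fst_lt {k m : Int} {st : Int × Int} (h : st ∈ pvStates k m) :
    0 ≤ st.1 ∧ st.1 < k := by
  unfold pvStates at h
  rcases List.mem_map.1 h with ⟨i, hi, rfl⟩
  rcases (PySem.List.mem_pyRange_one).1 hi with ⟨h1, h2⟩
  constructor <;> simp <;> omega


-- pvTk k is the largest t ≥ 0 with t(t+1) ≤ 2k (for k ≥ 0); helpers below.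
def pvTk (k : Int) : Int := pvTLoop (k.toNat + 1) k 0

theorem pvTLoop_spec (k : Int) : ∀ (fuel : Nat) (t : Int), 0 ≤ t → t * (t + 1) ≤ 2 * k →
    (k - t).toNat < fuel →
    t ≤ pvTLoop fuel k t ∧ (pvTLoop fuel k t) * (pvTLoop fuel k t + 1) ≤ 2 * k ∧
      2 * k < (pvTLoop fuel k t + 1) * (pvTLoop fuel k t + 2) := by
  intro fuel
  induction fuel with
  | zero => intro t _ _ h; omega
  | succ f ih =>
    intro t ht h1 h2
    simp only [pvTLoop]
    by_cases hg : (t + 1) * (t + 2) ≤ 2 * k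
    · rw [if_pos hg]
      have htk : t + 1 ≤ k := by nlinarith
      rcases ih (t + 1) (by omega) (by linarith) (by omega) with ⟨a, b, c⟩
      exact ⟨by omega, b, c⟩
    · rw [if_neg hg]
      exact ⟨le_refl _, h1, by omega⟩

theorem pvTk_spec (k : Int) (hk : 0 ≤ k) :
    0 ≤ pvTk k ∧ (pvTk k) * (pvTk k + 1) ≤ 2 * k ∧
      2 * k < (pvTk k + 1) * (pvTk k + 2) := by
  rcases pvTLoop_spec k (k.toNat + 1) 0 (le_refl _) (by omega) (by omega) with ⟨a, b, c⟩
  exact ⟨a, b, c⟩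

theorem pvTk_nonpos (k : Int) (hk : k ≤ 0) : pvTk k = 0 := by
  unfold pvTk
  have h0 : k.toNat = 0 := by omega
  rw [h0]
  simp only [pvTLoop]
  rw [if_neg (by omega)]

theorem pvTk_le_self (k : Int) (hk : 0 ≤ k) : pvTk k ≤ k := by
  rcases pvTk_spec k hk with ⟨h0, h1, _⟩
  nlinarith

theorem pvTk_ge_iff (k r : Int) (hk : 0 ≤ k) (hr : 0 ≤ r) :
    r ≤ pvTk k ↔ r * (r + 1) ≤ 2 * k := by
  rcases pvTk_spec k hk with ⟨h0, h1, h2⟩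
  constructor
  · intro h
    nlinarith
  · intro h
    by_contra hc
    have hc' : pvTk k + 1 ≤ r := by omega
    nlinarith

-- the mathematical value of Grundy(k, m)
def pvGS (k m : Int) : Int := if k < 0 then 0 else min (max m 0) (pvTk k)

theorem pvGS_zero (m : Int) : pvGS 0 m = 0 := by
  unfold pvGS
  rw [if_neg (by omega), pvTk_nonpos 0 (by omega)]
  omega

-- characterisation of the while-mex loop (given enough fuel)
theorem pvMexLoop_eq (s : List Int) (r : Int) : ∀ (fuel : Nat) (i : Int), i ≤ r →
    (r - i).toNat < fuel → r ∉ s → (∀ j, i ≤ j → j < r → j ∈ s) →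
    pvMexLoop fuel s i = r := by
  intro fuel
  induction fuel with
  | zero => intro i _ h; omega
  | succ f ih =>
    intro i hir hf hr hall
    simp only [pvMexLoop]
    by_cases hi : i ∈ s
    · rw [if_pos hi]
      have : i ≠ r := fun h => hr (h ▸ hi)
      exact ih (i + 1) (by omega) (by omega) hr (fun j h1 h2 => hall j (by omega) h2)
    · rw [if_neg hi]
      by_contra hc
      exact hi (hall i (le_refl _) (by omega))

-- memo invariant: every stored value is the mathematical Grundy value
def pvInv (memo : Std.HashMap (Int × Int) Int) : Prop :=
  ∀ p v, memo.get? p = some v → v = pvGS p.1 p.2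

theorem pvInv_empty : pvInv (∅ : Std.HashMap (Int × Int) Int) := by
  intro p v h
  simp [Std.HashMap.get?_eq_getElem?] at h

theorem pvInv_insert {memo : Std.HashMap (Int × Int) Int} {k m v : Int}
    (h : pvInv memo) (hv : v = pvGS k m) : pvInv (memo.insert (k, m) v) := by
  intro p w hp
  simp only [Std.HashMap.get?_eq_getElem?, Std.HashMap.getElem?_insert] at hp
  by_cases hpk : (k, m) = p
  · rw [if_pos (by simp [hpk])] at hp
    cases hp
    subst hpk
    exact hv
  · rw [if_neg (by simp [hpk])] at hp
    exact h p w (by simpa [Std.HashMap.get?_eq_getElem?] using hp)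

-- membership in pvStates
theorem pvStates_mem (k m : Int) (st : Int × Int) :
    st ∈ pvStates k m ↔ ∃ i : Int, 1 ≤ i ∧ i ≤ min k m ∧ st = (k - i, i - 1) := by
  unfold pvStates
  constructor
  · intro h
    rcases List.mem_map.1 h with ⟨i, hi, rfl⟩
    rcases (PySem.List.mem_pyRange_one).1 hi with ⟨h1, h2⟩
    exact ⟨i, h1, by omega, rfl⟩
  · rintro ⟨i, h1, h2, rfl⟩
    exact List.mem_map.2 ⟨i, (PySem.List.mem_pyRange_one).2 ⟨h1, by omega⟩, rfl⟩

theorem pvStates_len (k m : Int) :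
    (pvStates k m).length = (min k m).toNat := by
  unfold pvStates
  rw [List.length_map, PySem.List.length_pyRange_one]
  omega

-- the inner set-building foldl, assuming recursive calls are correct
theorem pvFold_spec (f : Nat) (k m : Int)
    (H : ∀ st : Int × Int, st ∈ pvStates k m → ∀ memo', pvInv memo' →
      (pvGrundy f st.1 st.2 memo').1 = pvGS st.1 st.2 ∧ pvInv (pvGrundy f st.1 st.2 memo').2) :
    ∀ (l : List (Int × Int)), (∀ st ∈ l, st ∈ pvStates k m) →
    ∀ (s : PySem.Set Int) (memo : Std.HashMap (Int × Int) Int), pvInv memo →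
      pvInv ((l.foldl
        (fun (acc : PySem.Set Int × Std.HashMap (Int × Int) Int) st =>
          let g := pvGrundy f st.1 st.2 acc.2
          (PySem.Set.add acc.1 g.1, g.2)) (s, memo))).2 ∧
      (∀ x, x ∈ ((l.foldl
        (fun (acc : PySem.Set Int × Std.HashMap (Int × Int) Int) st =>
          let g := pvGrundy f st.1 st.2 acc.2
          (PySem.Set.add acc.1 g.1, g.2)) (s, memo))).1 ↔
        x ∈ s ∨ ∃ st ∈ l, x = pvGS st.1 st.2) := by
  intro l
  induction l with
  | nil =>
    intro _ s memo hm
    exact ⟨hm, fun x => by simp⟩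
  | cons st rest ih =>
    intro hl s memo hm
    simp only [List.foldl_cons]
    rcases H st (hl st List.mem_cons_self) memo hm with ⟨hfst, hsnd⟩
    rcases ih (fun st' h => hl st' (List.mem_cons_of_mem _ h))
      (PySem.Set.add s (pvGrundy f st.1 st.2 memo).1)
      (pvGrundy f st.1 st.2 memo).2 hsnd with ⟨h1, h2⟩
    refine ⟨h1, fun x => ?_⟩
    rw [h2 x, PySem.Set.mem_add, hfst]
    constructor
    · rintro ((hx | hx) | ⟨st', hst', rfl⟩)
      · exact Or.inl hx
      · exact Or.inr ⟨st, List.mem_cons_self, hx⟩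
      · exact Or.inr ⟨st', List.mem_cons_of_mem _ hst', rfl⟩
    · rintro (hx | ⟨st', hst', rfl⟩)
      · exact Or.inl (Or.inl hx)
      · rcases List.mem_cons.1 hst' with rfl | h
        · exact Or.inl (Or.inr rfl)
        · exact Or.inr ⟨st', h, rfl⟩

-- main correctness of the memoised recursion (given enough fuel)
theorem pvGrundy_spec : ∀ (fuel : Nat) (k m : Int)
    (memo : Std.HashMap (Int × Int) Int), k.toNat < fuel → pvInv memo →
    (pvGrundy fuel k m memo).1 = pvGS k m ∧ pvInv (pvGrundy fuel k m memo).2 := by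
  intro fuel
  induction fuel with
  | zero => intro k m memo h; omega
  | succ N ih =>
    intro k m memo hk hinv
    simp only [pvGrundy]
    by_cases hk0 : k = 0
    · rw [if_pos hk0]
      exact ⟨(pvGS_zero m) ▸ (hk0 ▸ rfl), hinv⟩
    · rw [if_neg hk0]
      rcases hmm : memo.get? (k, m) with _ | v
      · simp only
        by_cases hlen : (pvStates k m).length = 0
        · rw [if_pos hlen]
          rw [pvStates_len] at hlen
          have hGS : pvGS k m = 0 := by
            unfold pvGS
            by_cases hneg : k < 0
            · rw [if_pos hneg]
            · rw [if_neg hneg]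
              rcases pvTk_spec k (by omega) with ⟨h0, _, _⟩
              omega
          exact ⟨hGS.symm, pvInv_insert hinv hGS.symm⟩
        · rw [if_neg hlen]
          rw [pvStates_len] at hlen
          have hM : 1 ≤ min k m := by omega
          have hk1 : 1 ≤ k := by omega
          have hH : ∀ st : Int × Int, st ∈ pvStates k m → ∀ memo', pvInv memo' →
              (pvGrundy N st.1 st.2 memo').1 = pvGS st.1 st.2 ∧
              pvInv (pvGrundy N st.1 st.2 memo').2 := by
            intro st hst memo' hm'
            rcases pvStates_fst_lt hst with ⟨ha, hb⟩
            exact ih st.1 st.2 memo' (by omega) hm'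
          rcases pvFold_spec N k m hH (pvStates k m) (fun _ h => h)
            PySem.Set.empty memo hinv with ⟨hinv', hmem⟩
          set S := ((pvStates k m).foldl
            (fun (acc : PySem.Set Int × Std.HashMap (Int × Int) Int) st =>
              let g := pvGrundy N st.1 st.2 acc.2
              (PySem.Set.add acc.1 g.1, g.2)) (PySem.Set.empty, memo)) with hSdef
          -- the set holds exactly the values pvGS (k-i) (i-1), 1 ≤ i ≤ min k m
          have hmem' : ∀ x, x ∈ S.1 ↔
              ∃ i : Int, 1 ≤ i ∧ i ≤ min k m ∧ x = pvGS (k - i) (i - 1) := by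
            intro x
            rw [hmem x]
            constructor
            · rintro (hx | ⟨st, hst, rfl⟩)
              · simp [PySem.Set.empty] at hx
              · rcases (pvStates_mem k m st).1 hst with ⟨i, h1, h2, hst1⟩
                exact ⟨i, h1, h2, by rw [hst1]⟩
            · rintro ⟨i, h1, h2, rfl⟩
              exact Or.inr ⟨(k - i, i - 1), (pvStates_mem k m _).2 ⟨i, h1, h2, rfl⟩, rfl⟩
          -- the mex equals min (min k m) (pvTk k)
          obtain ⟨htk0, htk1, htk2⟩ := pvTk_spec k (by omega)
          have htkle := pvTk_le_self k (by omega)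
          have hall : ∀ j : Int, 0 ≤ j → j < min (min k m) (pvTk k) → j ∈ S.1 := by
            intro j hj0 hjr
            apply (hmem' _).2
            refine ⟨j + 1, by omega, by omega, ?_⟩
            have hkj : 0 ≤ k - (j + 1) := by omega
            have hjt : j + 1 ≤ pvTk k := by omega
            have h2k : (j + 1) * (j + 2) ≤ 2 * k := by
              have := (pvTk_ge_iff k (j + 1) (by omega) (by omega)).1 hjt
              linarith [this]
            have hid : j * (j + 1) = (j + 1) * (j + 2) - 2 * (j + 1) := by ring
            have : j ≤ pvTk (k - (j + 1)) :=
              (pvTk_ge_iff (k - (j + 1)) j hkj hj0).2 (by omega)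
            unfold pvGS
            rw [if_neg (by omega)]
            omega
          have hfuel : (min (min k m) (pvTk k) - 0).toNat < S.1.length + 1 := by
            have hsub : Finset.Icc (0 : Int) (min (min k m) (pvTk k) - 1) ⊆ S.1.toFinset := by
              intro x hx
              rw [Finset.mem_Icc] at hx
              exact List.mem_toFinset.2 (hall x hx.1 (by omega))
            have hcard := Finset.card_le_card hsub
            rw [Int.card_Icc] at hcard
            have hfin := S.1.toFinset_card_le
            omega
          have hmex : pvMexLoop (S.1.length + 1) S.1 0 = min (min k m) (pvTk k) := by
            apply pvMexLoop_eq
            · omega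
            · exact hfuel
            · -- min (min k m) tk is not attained
              intro hc
              rcases (hmem' _).1 hc with ⟨i, h1, h2, heq⟩
              have hki : 0 ≤ k - i := by omega
              have heq' : min (i - 1) (pvTk (k - i)) = min (min k m) (pvTk k) := by
                unfold pvGS at heq
                rw [if_neg (by omega)] at heq
                omega
              set r := min (min k m) (pvTk k) with hr
              have hr0 : 0 ≤ r := by omega
              have hge1 : r ≤ i - 1 := by omega
              have hge2 : r ≤ pvTk (k - i) := by omega
              have hrk : r * (r + 1) ≤ 2 * (k - i) := (pvTk_ge_iff (k - i) r hki hr0).1 hge2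
              have hid : (r + 1) * (r + 2) = r * (r + 1) + 2 * r + 2 := by ring
              have h2k : (r + 1) * (r + 2) ≤ 2 * k := by omega
              have : r + 1 ≤ pvTk k :=
                (pvTk_ge_iff k (r + 1) (by omega) (by omega)).2 (by linarith [h2k, hid])
              omega
            · exact hall
          have hGSval : pvGS k m = min (min k m) (pvTk k) := by
            unfold pvGS
            rw [if_neg (by omega)]
            omega
          simp only
          rw [hmex, ← hGSval]
          exact ⟨rfl, pvInv_insert hinv' rfl⟩
      · simp only
        exact ⟨hinv (k, m) v hmm, hinv⟩

-- Grundy(k, k) equals the closed-form loop value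
theorem pvGS_diag (k : Int) : pvGS k k = pvTk k := by
  unfold pvGS
  by_cases hk : k < 0
  · rw [if_pos hk, pvTk_nonpos k (by omega)]
  · rw [if_neg hk]
    have h1 := pvTk_le_self k (by omega)
    have h2 := (pvTk_spec k (by omega)).1
    omega

-- the pile-folding loops agree
theorem pv_fold_eq : ∀ (piles : List Int) (acc : Int)
    (memo : Std.HashMap (Int × Int) Int), pvInv memo →
    (piles.foldl
      (fun (a : Int × Std.HashMap (Int × Int) Int) k =>
        let g := pvGrundy (k.toNat + 1) k k a.2
        (PySem.Int.bxor a.1 g.1, g.2)) (acc, memo)).1 =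
    piles.foldl (fun a k => PySem.Int.bxor a (pvTLoop (k.toNat + 1) k 0)) acc := by
  intro piles
  induction piles with
  | nil => intro acc memo _; rfl
  | cons k rest ih =>
    intro acc memo hm
    simp only [List.foldl_cons]
    rcases pvGrundy_spec (k.toNat + 1) k k memo (by omega) hm with ⟨h1, h2⟩
    rw [h1, pvGS_diag]
    show _ = List.foldl _ (PySem.Int.bxor acc (pvTk k)) rest
    exact ih _ _ h2

-- ===== VERDICT (by name: the statement is the Claim_ definition above) =====
theorem can_jon_win_spec : Claim_equal_can_jon_win := by
  intro n piles _
  unfold Spec_can_jon_win can_jon_win can_jon_win_alt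
  simp only [pv_fold_eq piles 0 _ pvInv_empty]
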